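-- pv_equiv track=rewrite | github.com/harshalyeole/OA | CodeSignal:Codility:Hackerrank/CodeSignal-AddArray.py | solution
-- ===== SOURCE A (Python) =====
-- def solution(a):
--     b = [0]*len(a)
--     for i in range(len(a)):
--         if i+1>=len(a) or i-1<0:
--             if i+1>=len(a) and i-1<0:
--                 b[i] = a[i]
--             elif i+1>=len(a):
--                 b[i] = a[i-1] + a[i]
--             elif i-1<0:
--                 b[i] = a[i] + a[i+1]
--         else:
--             b[i] = a[i-1] + a[i] + a[i+1]
--     return b
-- ===== SOURCE B (Python) =====
-- def solution(a):
--     n = len(a)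
--     p = [0]
--     s = 0
--     for x in a:
--         s += x
--         p.append(s)
--     return [p[min(i + 2, n)] - p[max(i - 1, 0)] for i in range(n)]
-- ===== Notes on version B (the rewrite author's own statement) =====
-- stated objective: alternative
-- what changed: Replaces the per-index four-way boundary branch writing into a preallocated array by a prefix-sum pass plus a branch-free comprehension with clamped indices b[i] = P[min(i+2,n)] - P[max(i-1,0)].
import Mathlib
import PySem

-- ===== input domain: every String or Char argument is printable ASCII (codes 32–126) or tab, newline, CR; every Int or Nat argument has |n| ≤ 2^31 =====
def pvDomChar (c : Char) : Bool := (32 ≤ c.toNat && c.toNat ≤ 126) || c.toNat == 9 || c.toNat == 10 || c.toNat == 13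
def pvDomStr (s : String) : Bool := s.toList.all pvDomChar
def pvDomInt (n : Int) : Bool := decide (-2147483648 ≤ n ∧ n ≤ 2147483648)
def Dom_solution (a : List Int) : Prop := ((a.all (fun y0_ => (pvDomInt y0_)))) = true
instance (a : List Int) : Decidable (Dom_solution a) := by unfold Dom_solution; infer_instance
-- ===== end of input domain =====

-- B replaces A's per-index boundary branching by a prefix-sum list and clamped-index differences (alternative decomposition, same O(n) cost).

-- ===== PORT A =====
-- literal port of A: b = [0]*n; for i in range(n): branch chain assigning b[i]
def solution (a : List Int) : List Int :=
  let n : Int := a.length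
  (PySem.List.pyRange 0 n 1).foldl
    (fun b i =>
      PySem.List.pySetD b i
        (if i + 1 ≥ n ∨ i - 1 < 0 then
          if i + 1 ≥ n ∧ i - 1 < 0 then PySem.List.pyGetD a i 0
          else if i + 1 ≥ n then PySem.List.pyGetD a (i - 1) 0 + PySem.List.pyGetD a i 0
          else if i - 1 < 0 then PySem.List.pyGetD a i 0 + PySem.List.pyGetD a (i + 1) 0
          else PySem.List.pyGetD b i 0   -- unreachable in Python: b[i] keeps its value
        else PySem.List.pyGetD a (i - 1) 0 + PySem.List.pyGetD a i 0 + PySem.List.pyGetD a (i + 1) 0))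
    (List.replicate a.length 0)

-- ===== PORT B =====
-- literal port of Source B: one prefix-sum pass, then a branch-free comprehension with clamped indices
def solution_alt (a : List Int) : List Int :=
  let n : Int := a.length
  let ps := a.foldl (fun (st : List Int × Int) x => (st.1 ++ [st.2 + x], st.2 + x)) ([0], 0)
  (PySem.List.pyRange 0 n 1).map
    (fun i => PySem.List.pyGetD ps.1 (min (i + 2) n) 0 - PySem.List.pyGetD ps.1 (max (i - 1) 0) 0)

-- ===== PRECONDITION & SPEC =====
def Spec_solution (a : List Int) (out : List Int) : Prop := out = solution_alt a
instance (a : List Int) (out : List Int) : Decidable (Spec_solution a out) := by unfold Spec_solution; infer_instance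

-- ===== CLAIM (what is proved, stated in full; the proofs are below) =====
def Claim_equal_solution : Prop := ∀ (a : List Int), Dom_solution a → Spec_solution a (solution a)

-- ===== LEMMAS AND PROOFS =====

-- prefix sums: pvS a j = sum of the first j elements of a
def pvS (a : List Int) (j : Nat) : Int := (a.take j).sum

-- the value A writes at index i (a function of a and i only; A's dead re-read of b[i] is unreachable)
def pvV (a : List Int) (i : Int) : Int :=
  if i + 1 ≥ (a.length : Int) ∨ i - 1 < 0 then
    if i + 1 ≥ (a.length : Int) ∧ i - 1 < 0 then PySem.List.pyGetD a i 0
    else if i + 1 ≥ (a.length : Int) then PySem.List.pyGetD a (i - 1) 0 + PySem.List.pyGetD a i 0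
    else PySem.List.pyGetD a i 0 + PySem.List.pyGetD a (i + 1) 0
  else PySem.List.pyGetD a (i - 1) 0 + PySem.List.pyGetD a i 0 + PySem.List.pyGetD a (i + 1) 0

lemma pvS_succ (a : List Int) (j : Nat) (hj : j < a.length) :
    pvS a (j + 1) = pvS a j + a.getD j 0 := by
  unfold pvS
  rw [List.sum_take_succ _ _ hj, List.getD_eq_getElem _ _ hj]

lemma pvS_zero (a : List Int) : pvS a 0 = 0 := by simp [pvS]

lemma pfx_char (a : List Int) :
    a.foldl (fun (st : List Int × Int) x => (st.1 ++ [st.2 + x], st.2 + x)) ([0], 0)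
      = ((List.range (a.length + 1)).map (pvS a), a.sum) := by
  induction a using List.reverseRecOn with
  | nil => simp [pvS]
  | append_singleton a x ih =>
      rw [List.foldl_append, ih]
      simp only [List.foldl_cons, List.foldl_nil, Prod.mk.injEq]
      refine ⟨?_, by simp⟩
      rw [List.length_append, List.length_singleton,
        List.range_succ (n := a.length + 1), List.map_append]
      congr 1
      · refine List.map_congr_left (fun j hj => ?_)
        rw [List.mem_range] at hj
        have ht := List.take_append_of_le_length (l₁ := a) (l₂ := [x]) (i := j) (by omega)
        simp [pvS, ht]
      · have ht : (a ++ [x]).length ≤ a.length + 1 := by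
          simp
        simp [pvS, List.take_of_length_le ht]

lemma aFold_char (a : List Int) (m : Nat) (hm : m ≤ a.length) :
    (PySem.List.pyRange 0 (m : Int) 1).foldl
      (fun b i =>
        PySem.List.pySetD b i
          (if i + 1 ≥ (a.length : Int) ∨ i - 1 < 0 then
            if i + 1 ≥ (a.length : Int) ∧ i - 1 < 0 then PySem.List.pyGetD a i 0
            else if i + 1 ≥ (a.length : Int) then PySem.List.pyGetD a (i - 1) 0 + PySem.List.pyGetD a i 0
            else if i - 1 < 0 then PySem.List.pyGetD a i 0 + PySem.List.pyGetD a (i + 1) 0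
            else PySem.List.pyGetD b i 0
          else PySem.List.pyGetD a (i - 1) 0 + PySem.List.pyGetD a i 0 + PySem.List.pyGetD a (i + 1) 0))
      (List.replicate a.length 0)
      = (List.range m).map (fun k : Nat => pvV a (k : Int)) ++ List.replicate (a.length - m) 0 := by
  induction m with
  | zero => simp [PySem.List.pyRange_one_eq_nil]
  | succ m ih =>
      have hm' : m ≤ a.length := by omega
      have hcast : ((m + 1 : Nat) : Int) = (m : Int) + 1 := by push_cast; ring
      rw [hcast, PySem.List.pyRange_one_succ_right (by positivity), List.foldl_append, ih hm']
      simp only [List.foldl_cons, List.foldl_nil]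
      have hval : ∀ b : List Int,
          (if (m : Int) + 1 ≥ (a.length : Int) ∨ (m : Int) - 1 < 0 then
            if (m : Int) + 1 ≥ (a.length : Int) ∧ (m : Int) - 1 < 0 then PySem.List.pyGetD a (m : Int) 0
            else if (m : Int) + 1 ≥ (a.length : Int) then PySem.List.pyGetD a ((m : Int) - 1) 0 + PySem.List.pyGetD a (m : Int) 0
            else if (m : Int) - 1 < 0 then PySem.List.pyGetD a (m : Int) 0 + PySem.List.pyGetD a ((m : Int) + 1) 0
            else PySem.List.pyGetD b (m : Int) 0
          else PySem.List.pyGetD a ((m : Int) - 1) 0 + PySem.List.pyGetD a (m : Int) 0 + PySem.List.pyGetD a ((m : Int) + 1) 0)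
            = pvV a (m : Int) := by
        intro b
        unfold pvV
        split_ifs <;> first | rfl | omega
      rw [hval, PySem.List.pySetD_natCast]
      have hrep : a.length - m = (a.length - (m + 1)) + 1 := by omega
      rw [hrep, List.replicate_succ, List.range_succ, List.map_append,
        List.set_append_right _ _ (by simp), List.append_assoc]
      simp

lemma solution_eq_map (a : List Int) :
    solution a = (List.range a.length).map (fun k : Nat => pvV a (k : Int)) := by
  unfold solution
  rw [aFold_char a a.length le_rfl]
  simp

lemma getD_map_range_pvS (a : List Int) (j : Nat) (hj : j ≤ a.length) :
    ((List.range (a.length + 1)).map (pvS a)).getD j 0 = pvS a j := by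
  rw [List.getD_eq_getElem _ _ (by simp; omega)]
  simp

lemma solution_alt_eq_map (a : List Int) :
    solution_alt a = (List.range a.length).map
      (fun k : Nat => pvS a (min (k + 2) a.length) - pvS a (k - 1)) := by
  unfold solution_alt
  dsimp only
  rw [pfx_char a, PySem.List.pyRange_one]
  simp only [sub_zero, Int.toNat_natCast, List.map_map]
  refine List.map_congr_left (fun k hk => ?_)
  rw [List.mem_range] at hk
  have h1 : min ((0 : Int) + (k : Int) + 2) ((a.length : Nat) : Int)
      = ((min (k + 2) a.length : Nat) : Int) := by push_cast; omega
  have h2 : max ((0 : Int) + (k : Int) - 1) 0 = ((k - 1 : Nat) : Int) := by omega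
  simp only [Function.comp_apply, h1, h2, PySem.List.pyGetD_natCast]
  rw [getD_map_range_pvS a _ (by omega), getD_map_range_pvS a _ (by omega)]

lemma pointwise (a : List Int) (k : Nat) (hk : k < a.length) :
    pvV a (k : Int) = pvS a (min (k + 2) a.length) - pvS a (k - 1) := by
  unfold pvV
  have hget : ∀ j : Nat, j < a.length → PySem.List.pyGetD a (j : Int) 0 = a.getD j 0 := by
    intro j hj; simp [PySem.List.pyGetD_natCast]
  split_ifs with h1 h2 h3
  · -- the only element: a.length = 1, k = 0
    have hk0 : k = 0 := by omega
    subst hk0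
    rw [hget 0 hk]
    have e1 : pvS a 1 = pvS a 0 + a.getD 0 0 := by
      rw [show (1 : Nat) = 0 + 1 from rfl]; exact pvS_succ a 0 hk
    have h0 := pvS_zero a
    have hmin : min (0 + 2) a.length = 1 := by omega
    rw [hmin]
    simp only [Nat.zero_sub]
    omega
  · -- last element, k ≥ 1 : a[k-1] + a[k]
    have hk1 : 1 ≤ k := by omega
    have hc : ((k : Int) - 1) = ((k - 1 : Nat) : Int) := by omega
    rw [hc, hget (k - 1) (by omega), hget k hk]
    have e1 := pvS_succ a (k - 1) (by omega)
    have e2 := pvS_succ a k hk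
    have hkm : k - 1 + 1 = k := by omega
    rw [hkm] at e1
    have hmin : min (k + 2) a.length = k + 1 := by omega
    rw [hmin]
    omega
  · -- first element, a.length ≥ 2 : a[0] + a[1]
    have hk0 : k = 0 := by omega
    subst hk0
    have hc2 : ((0 : Nat) : Int) + 1 = ((1 : Nat) : Int) := by norm_num
    rw [hget 0 hk, hc2, hget 1 (by omega)]
    have h0 := pvS_zero a
    have e1 := pvS_succ a 0 hk
    have e2 : pvS a 2 = pvS a 1 + a.getD 1 0 := by
      rw [show (2 : Nat) = 1 + 1 from rfl]; exact pvS_succ a 1 (by omega)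
    have e1' : pvS a 1 = pvS a 0 + a.getD 0 0 := by
      rw [show (1 : Nat) = 0 + 1 from rfl]; exact e1
    have hmin : min (0 + 2) a.length = 2 := by omega
    rw [hmin]
    simp only [Nat.zero_sub]
    omega
  · -- middle : a[k-1] + a[k] + a[k+1]
    have hk1 : 1 ≤ k := by omega
    have hkn : k + 1 < a.length := by omega
    have hc : ((k : Int) - 1) = ((k - 1 : Nat) : Int) := by omega
    have hc2 : ((k : Int) + 1) = ((k + 1 : Nat) : Int) := by push_cast; ring
    rw [hc, hc2, hget (k - 1) (by omega), hget k hk, hget (k + 1) hkn]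
    have e1 := pvS_succ a (k - 1) (by omega)
    have e2 := pvS_succ a k hk
    have e3 : pvS a (k + 2) = pvS a (k + 1) + a.getD (k + 1) 0 := by
      rw [show k + 2 = k + 1 + 1 from by omega]; exact pvS_succ a (k + 1) hkn
    have hkm : k - 1 + 1 = k := by omega
    rw [hkm] at e1
    have hmin : min (k + 2) a.length = k + 2 := by omega
    rw [hmin]
    omega

-- ===== VERDICT (by name: the statement is the Claim_ definition above) =====
theorem solution_spec : Claim_equal_solution := by
  intro a _
  unfold Spec_solution
  rw [solution_eq_map, solution_alt_eq_map]
  exact List.map_congr_left (fun k hk => pointwise a k (List.mem_range.mp hk))
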